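-- pv_equiv track=rewrite | github.com/Supradin4ik/Test | app/services/planning_service.py | _stage_status_from_materials
-- ===== SOURCE A (Python) =====
-- STATUS_LABELS = {
--     "done": "Готово",
--     "in_progress": "В работе",
--     "pending": "Ожидание",
--     "blocked": "Нет металла",
-- }
--
-- def _stage_status_from_materials(statuses: list[str], fallback_batch_status: str) -> tuple[str, str]:
--     if any(status == "blocked" for status in statuses):
--         return "blocked", STATUS_LABELS["blocked"]
--     if statuses and all(status == "done" for status in statuses):
--         return "done", STATUS_LABELS["done"]
--     if any(status == "pending" for status in statuses):
--         return "pending", STATUS_LABELS["pending"]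
--     mapped = fallback_batch_status if fallback_batch_status in STATUS_LABELS else "pending"
--     return mapped, STATUS_LABELS[mapped]
-- ===== SOURCE B (Python) =====
-- STATUS_LABELS = {
--     "done": "Готово",
--     "in_progress": "В работе",
--     "pending": "Ожидание",
--     "blocked": "Нет металла",
-- }
--
-- _SEVERITY = {"blocked": 2, "pending": 1}
--
--
-- def _stage_status_from_materials(statuses: list[str], fallback_batch_status: str) -> tuple[str, str]:
--     # One pass: fold the list to (worst severity, all-done flag); worst = -1 marks empty.
--     worst = -1
--     all_done = True
--     for s in statuses:
--         r = _SEVERITY.get(s, 0)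
--         if r > worst:
--             worst = r
--         all_done = all_done and s == "done"
--     if worst == 2:
--         return "blocked", STATUS_LABELS["blocked"]
--     if all_done and worst >= 0:
--         return "done", STATUS_LABELS["done"]
--     if worst == 1:
--         return "pending", STATUS_LABELS["pending"]
--     mapped = fallback_batch_status if fallback_batch_status in STATUS_LABELS else "pending"
--     return mapped, STATUS_LABELS[mapped]
-- ===== Notes on version B (the rewrite author's own statement) =====
-- stated objective: alternative
-- what changed: B makes one pass folding the list into a numeric worst-severity accumulator (blocked=2, pending=1, other=0, -1 for empty) plus an all-done flag, then branches on those two scalars, instead of A's three separate short-circuiting any/all scans.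
import Mathlib
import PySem

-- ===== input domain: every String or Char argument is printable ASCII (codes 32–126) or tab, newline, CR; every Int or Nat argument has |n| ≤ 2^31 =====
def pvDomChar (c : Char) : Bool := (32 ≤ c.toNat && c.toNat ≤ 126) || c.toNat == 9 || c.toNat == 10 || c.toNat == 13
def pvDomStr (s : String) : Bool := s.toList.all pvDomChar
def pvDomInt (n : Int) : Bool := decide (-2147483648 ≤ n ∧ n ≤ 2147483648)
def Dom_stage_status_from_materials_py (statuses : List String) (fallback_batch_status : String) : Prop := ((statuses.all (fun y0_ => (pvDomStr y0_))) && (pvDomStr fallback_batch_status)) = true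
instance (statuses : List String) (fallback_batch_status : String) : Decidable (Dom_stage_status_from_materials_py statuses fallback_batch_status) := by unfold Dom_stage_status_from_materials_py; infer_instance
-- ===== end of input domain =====

-- B folds the list once into a numeric worst-severity accumulator plus an all-done flag and
-- branches on those two scalars, instead of A's three separate any/all scans (alternative; same O(n)).

-- ===== PORT A =====
def pvSTATUS_LABELS : PySem.Dict String String :=
  PySem.Dict.ofList [("done", "Готово"), ("in_progress", "В работе"),
    ("pending", "Ожидание"), ("blocked", "Нет металла")]

def stage_status_from_materials_py (statuses : List String) (fallback_batch_status : String) : String × String :=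
  if statuses.any (fun status => status == "blocked") then
    ("blocked", pvSTATUS_LABELS.getD "blocked" "")
  else if (!statuses.isEmpty) && statuses.all (fun status => status == "done") then
    ("done", pvSTATUS_LABELS.getD "done" "")
  else if statuses.any (fun status => status == "pending") then
    ("pending", pvSTATUS_LABELS.getD "pending" "")
  else
    let mapped := if pvSTATUS_LABELS.contains fallback_batch_status then fallback_batch_status else "pending"
    (mapped, pvSTATUS_LABELS.getD mapped "")

-- ===== PORT B =====
def pvSEVERITY : PySem.Dict String Int :=
  PySem.Dict.ofList [("blocked", 2), ("pending", 1)]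

-- the loop 'for s in statuses: r = _SEVERITY.get(s, 0); if r > worst: worst = r; all_done = all_done and s == "done"'
def pvScan (statuses : List String) : Int × Bool :=
  statuses.foldl
    (fun acc s =>
      let r := pvSEVERITY.getD s 0
      ((if r > acc.1 then r else acc.1), acc.2 && (s == "done")))
    (-1, true)

def stage_status_from_materials_py_alt (statuses : List String) (fallback_batch_status : String) : String × String :=
  let scan := pvScan statuses
  let worst := scan.1
  let all_done := scan.2
  if worst == 2 then
    ("blocked", pvSTATUS_LABELS.getD "blocked" "")
  else if all_done && decide (0 ≤ worst) then
    ("done", pvSTATUS_LABELS.getD "done" "")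
  else if worst == 1 then
    ("pending", pvSTATUS_LABELS.getD "pending" "")
  else
    let mapped := if pvSTATUS_LABELS.contains fallback_batch_status then fallback_batch_status else "pending"
    (mapped, pvSTATUS_LABELS.getD mapped "")

-- ===== PRECONDITION & SPEC =====
def Spec_stage_status_from_materials_py (statuses : List String) (fallback_batch_status : String) (out : String × String) : Prop := out = stage_status_from_materials_py_alt statuses fallback_batch_status
instance (statuses : List String) (fallback_batch_status : String) (out : String × String) : Decidable (Spec_stage_status_from_materials_py statuses fallback_batch_status out) := by unfold Spec_stage_status_from_materials_py; infer_instance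

-- ===== CLAIM (what is proved, stated in full; the proofs are below) =====
def Claim_equal_stage_status_from_materials_py : Prop := ∀ (statuses : List String) (fallback_batch_status : String), Dom_stage_status_from_materials_py statuses fallback_batch_status → Spec_stage_status_from_materials_py statuses fallback_batch_status (stage_status_from_materials_py statuses fallback_batch_status)

-- ===== LEMMAS AND PROOFS =====
-- severity rank of one status, written out
def pvRank (s : String) : Int := if s == "blocked" then 2 else if s == "pending" then 1 else 0

theorem pvSEVERITY_getD (s : String) : pvSEVERITY.getD s 0 = pvRank s := by
  have h : pvSEVERITY = PySem.Dict.mk [("blocked", 2), ("pending", 1)] := by rfl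
  rw [h]
  simp only [PySem.Dict.getD, PySem.Dict.get?_mk_cons, pvRank]
  by_cases hb : s = "blocked"
  · subst hb; rfl
  · by_cases hp : s = "pending"
    · subst hp; rfl
    · have hb' : ¬ ("blocked" = s) := fun h' => hb h'.symm
      have hp' : ¬ ("pending" = s) := fun h' => hp h'.symm
      simp [PySem.Dict.get?, hb, hp, hb', hp']

-- the worst severity of a whole list, in terms of A's scans
def pvR (xs : List String) : Int :=
  if xs.any (fun s => s == "blocked") then 2
  else if xs.any (fun s => s == "pending") then 1
  else if xs.isEmpty then -1 else 0

theorem pvR_cons (x : String) (xs : List String) : pvR (x :: xs) = max (pvRank x) (pvR xs) := by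
  simp only [pvR, pvRank, List.any_cons, List.isEmpty_cons]
  by_cases hb : x == "blocked" <;> by_cases hp : x == "pending" <;>
    simp [hb, hp] <;> split_ifs <;> simp_all

theorem pvMaxIf (a r : Int) : (if r > a then r else a) = max a r := by
  split_ifs <;> omega

theorem pvScan_go (xs : List String) (w : Int) (b : Bool) (hw : -1 ≤ w) :
    xs.foldl
      (fun acc s =>
        let r := pvSEVERITY.getD s 0
        ((if r > acc.1 then r else acc.1), acc.2 && (s == "done")))
      (w, b)
    = (max w (pvR xs), b && xs.all (fun s => s == "done")) := by
  induction xs generalizing w b with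
  | nil =>
      have hnil : pvR [] = -1 := by simp [pvR]
      simp only [List.foldl_nil, List.all_nil, Bool.and_true, hnil, max_eq_left hw]
  | cons x xs ih =>
      have hrank : (0 : Int) ≤ pvRank x := by unfold pvRank; split_ifs <;> omega
      have hstep :
          (let r := pvSEVERITY.getD x 0
           ((if r > (w, b).1 then r else (w, b).1), (w, b).2 && (x == "done")))
          = (max w (pvRank x), b && (x == "done")) := by
        simp [pvSEVERITY_getD, pvMaxIf]
      rw [List.foldl_cons, hstep, ih _ _ (by omega), pvR_cons, List.all_cons,
        max_assoc, Bool.and_assoc]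

theorem pvScan_eq (xs : List String) :
    pvScan xs = (pvR xs, xs.all (fun s => s == "done")) := by
  rw [pvScan, pvScan_go _ _ _ (by omega)]
  have : -1 ≤ pvR xs := by unfold pvR; split_ifs <;> omega
  rw [max_eq_right this, Bool.true_and]

-- ===== VERDICT (by name: the statement is the Claim_ definition above) =====
theorem stage_status_from_materials_py_spec : Claim_equal_stage_status_from_materials_py := by
  intro statuses fallback_batch_status _
  unfold Spec_stage_status_from_materials_py
  simp only [stage_status_from_materials_py, stage_status_from_materials_py_alt, pvScan_eq]
  by_cases hb : statuses.any (fun s => s == "blocked") <;>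
    by_cases hp : statuses.any (fun s => s == "pending") <;>
      by_cases he : statuses.isEmpty <;>
        simp_all [pvR]
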